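-- pv_equiv track=rewrite | github.com/cosmoquester/ESMA | meta/reward.py | multilevel_reward3
-- ===== SOURCE A (Python) =====
-- def multilevel_reward3(direct_correctness: list[int], meta_yes: list[int]) -> list[int]:
--     rewards = []
--     for correct, yes in zip(direct_correctness, meta_yes):
--         if correct == yes:
--             if correct:
--                 rewards.append(2)
--             else:
--                 rewards.append(1)
--         else:
--             if correct:
--                 rewards.append(1)
--             else:
--                 rewards.append(0)
--     return rewards
-- ===== SOURCE B (Python) =====
-- def multilevel_reward3(direct_correctness: list[int], meta_yes: list[int]) -> list[int]:
--     # Staged decomposition: compute the two reward components in separate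
--     # passes, then sum them elementwise.
--     n = min(len(direct_correctness), len(meta_yes))
--     correctness_points = [0 if c == 0 else 1 for c in direct_correctness[:n]]
--     agreement_points = [1 if c == y else 0 for c, y in zip(direct_correctness, meta_yes)]
--     return [cp + ap for cp, ap in zip(correctness_points, agreement_points)]
-- ===== Notes on version B (the rewrite author's own statement) =====
-- stated objective: alternative
-- what changed: Replaces A's single fused accumulator loop with four-way nested branching by a staged decomposition: two independent passes build a correctness-point list and an agreement-point list, and a final pass sums them elementwise.
import Mathlib
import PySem

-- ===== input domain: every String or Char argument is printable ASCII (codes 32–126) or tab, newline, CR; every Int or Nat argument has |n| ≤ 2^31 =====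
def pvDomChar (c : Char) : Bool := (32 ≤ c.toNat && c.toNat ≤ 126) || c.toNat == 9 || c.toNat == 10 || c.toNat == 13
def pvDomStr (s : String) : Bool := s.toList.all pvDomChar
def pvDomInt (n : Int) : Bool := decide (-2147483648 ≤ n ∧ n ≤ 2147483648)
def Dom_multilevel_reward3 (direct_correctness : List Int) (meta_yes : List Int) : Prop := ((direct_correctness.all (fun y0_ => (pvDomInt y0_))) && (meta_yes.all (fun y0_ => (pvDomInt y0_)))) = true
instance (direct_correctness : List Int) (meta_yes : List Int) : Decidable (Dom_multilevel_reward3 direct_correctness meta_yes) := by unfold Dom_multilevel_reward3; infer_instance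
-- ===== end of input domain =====

-- B replaces A's fused branching accumulator loop by staged passes: two component lists summed elementwise (alternative decomposition, same cost).
-- ===== PORT A =====
def multilevel_reward3 (direct_correctness : List Int) (meta_yes : List Int) : List Int :=
  (List.zip direct_correctness meta_yes).foldl
    (fun rewards p =>
      let correct := p.1
      let yes := p.2
      if correct == yes then
        if correct ≠ 0 then rewards ++ [2] else rewards ++ [1]
      else
        if correct ≠ 0 then rewards ++ [1] else rewards ++ [0])
    []

-- ===== PORT B =====
def multilevel_reward3_alt (direct_correctness : List Int) (meta_yes : List Int) : List Int :=
  let n := min direct_correctness.length meta_yes.length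
  let correctness_points := (direct_correctness.take n).map (fun c => if c = 0 then (0:Int) else 1)
  let agreement_points := (List.zip direct_correctness meta_yes).map (fun p => if p.1 = p.2 then (1:Int) else 0)
  (List.zip correctness_points agreement_points).map (fun p => p.1 + p.2)

-- ===== PRECONDITION & SPEC =====
def Spec_multilevel_reward3 (direct_correctness : List Int) (meta_yes : List Int) (out : List Int) : Prop := out = multilevel_reward3_alt direct_correctness meta_yes
instance (direct_correctness : List Int) (meta_yes : List Int) (out : List Int) : Decidable (Spec_multilevel_reward3 direct_correctness meta_yes out) := by unfold Spec_multilevel_reward3; infer_instance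

-- ===== CLAIM (what is proved, stated in full; the proofs are below) =====
def Claim_equal_multilevel_reward3 : Prop := ∀ (direct_correctness : List Int) (meta_yes : List Int), Dom_multilevel_reward3 direct_correctness meta_yes → Spec_multilevel_reward3 direct_correctness meta_yes (multilevel_reward3 direct_correctness meta_yes)

-- ===== LEMMAS AND PROOFS =====
-- A's loop appends one reward per zipped pair: it equals a map over the zip.
theorem foldl_app (l : List (Int × Int)) (acc : List Int) :
    l.foldl
      (fun rewards p =>
        let correct := p.1
        let yes := p.2
        if correct == yes then
          if correct ≠ 0 then rewards ++ [2] else rewards ++ [1]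
        else
          if correct ≠ 0 then rewards ++ [1] else rewards ++ [0])
      acc
    = acc ++ l.map (fun p => (if p.1 = 0 then (0:Int) else 1) + (if p.1 = p.2 then 1 else 0)) := by
  induction l generalizing acc with
  | nil => simp
  | cons h t ih =>
    simp only [List.foldl, List.map]
    rw [ih]
    rcases h with ⟨c, y⟩
    by_cases hcy : c = y
    · subst hcy
      by_cases hc : c = 0
      · subst hc; simp
      · simp [hc]
    · by_cases hc : c = 0
      · subst hc; simp [hcy]
      · simp [hcy, hc]

-- B's staged passes also compute that map over the zip.
theorem alt_eq_map (dc my : List Int) :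
    multilevel_reward3_alt dc my
    = (List.zip dc my).map (fun p => (if p.1 = 0 then (0:Int) else 1) + (if p.1 = p.2 then 1 else 0)) := by
  unfold multilevel_reward3_alt
  induction dc generalizing my with
  | nil => simp
  | cons c dc ih =>
    cases my with
    | nil => simp
    | cons y my =>
      simpa [Nat.succ_min_succ, List.zip_cons_cons] using ih my

-- ===== VERDICT (by name: the statement is the Claim_ definition above) =====
theorem multilevel_reward3_spec : Claim_equal_multilevel_reward3 := by
  intro dc my _
  show _ = _
  rw [alt_eq_map]
  unfold multilevel_reward3
  rw [foldl_app]
  simp
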